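-- pv_equiv track=rewrite | github.com/ixsh1/S-AES | saes/S_AES.py | ascii_string_to_blocks
-- ===== SOURCE A (Python) =====
-- def ascii_string_to_blocks(s: str) -> list:
--     blocks = []
--     for i in range(0, len(s), 2):
--         block = (ord(s[i]) << 8)
--         if i + 1 < len(s):
--             block |= ord(s[i + 1])
--         else:
--             block |= 0
--         blocks.append(block)
--     return blocks
-- ===== SOURCE B (Python) =====
-- def ascii_string_to_blocks(s: str) -> list:
--     # Normalize: pad to even length with NUL, then one uniform branch-free pass
--     # over consecutive character pairs.
--     if len(s) % 2:
--         s += "\0"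
--     it = iter(s)
--     return [(ord(hi) << 8) | ord(lo) for hi, lo in zip(it, it)]
-- ===== Notes on version B (the rewrite author's own statement) =====
-- stated objective: simpler
-- what changed: B pads the string with one NUL when its length is odd and then combines consecutive character pairs in a single uniform branch-free pass (zip over an iterator), instead of A's index loop with an in-loop bounds check and per-step indexing.
import Mathlib
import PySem

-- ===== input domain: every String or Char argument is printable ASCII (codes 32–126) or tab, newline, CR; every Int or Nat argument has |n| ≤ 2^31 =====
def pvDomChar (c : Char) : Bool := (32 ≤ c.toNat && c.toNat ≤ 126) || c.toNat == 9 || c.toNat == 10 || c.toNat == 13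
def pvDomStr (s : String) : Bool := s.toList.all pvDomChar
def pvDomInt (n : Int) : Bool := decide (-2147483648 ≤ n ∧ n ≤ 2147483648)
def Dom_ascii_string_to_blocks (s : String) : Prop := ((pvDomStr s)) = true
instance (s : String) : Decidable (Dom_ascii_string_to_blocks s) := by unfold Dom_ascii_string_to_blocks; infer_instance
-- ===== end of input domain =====

-- B pads the string with one NUL when its length is odd and then combines consecutive
-- character pairs in a single uniform branch-free pass, instead of A's index loop with
-- an in-loop bounds check on i+1 (objective: simpler).

-- ===== PORT A =====
-- the for-loop 'for i in range(0, len(s), 2)' as structural recursion on the index i,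
-- stepping by 2; s[i] and s[i+1] are always in range (i < len, i+1 < len guards), so
-- the dependent getElem is exact here.
def asciiGoA (cs : List Char) (i : Nat) (blocks : List Int) : List Int :=
  if h : i < cs.length then
    let block : Int := ((cs[i]'h).toNat : Int) <<< 8
    let block : Int :=
      if h2 : i + 1 < cs.length then PySem.Int.bor block ((cs[i+1]'h2).toNat : Int)
      else PySem.Int.bor block 0
    asciiGoA cs (i + 2) (blocks ++ [block])
  else blocks
termination_by cs.length - i

def ascii_string_to_blocks (s : String) : List Int :=
  asciiGoA s.toList 0 []

-- ===== PORT B =====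
-- 'if len(s) % 2: s += "\0"'
def asciiPadB (cs : List Char) : List Char :=
  if cs.length % 2 = 1 then cs ++ [Char.ofNat 0] else cs

-- 'zip(it, it)': consecutive (hi, lo) pairs of the (even-length) padded string
def asciiPairsB : List Char → List (Char × Char)
  | hi :: lo :: rest => (hi, lo) :: asciiPairsB rest
  | _ => []

def ascii_string_to_blocks_alt (s : String) : List Int :=
  (asciiPairsB (asciiPadB s.toList)).map
    (fun p => PySem.Int.bor ((p.1.toNat : Int) <<< 8) (p.2.toNat : Int))

-- ===== PRECONDITION & SPEC =====
def Spec_ascii_string_to_blocks (s : String) (out : List Int) : Prop := out = ascii_string_to_blocks_alt s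
instance (s : String) (out : List Int) : Decidable (Spec_ascii_string_to_blocks s out) := by unfold Spec_ascii_string_to_blocks; infer_instance

-- ===== CLAIM (what is proved, stated in full; the proofs are below) =====
def Claim_equal_ascii_string_to_blocks : Prop := ∀ (s : String), Dom_ascii_string_to_blocks s → Spec_ascii_string_to_blocks s (ascii_string_to_blocks s)

-- ===== LEMMAS AND PROOFS =====

-- A's result on the suffix cs.drop i, written as direct two-at-a-time recursion
def asciiBody : List Char → List Int
  | [] => []
  | [hi] => [PySem.Int.bor ((hi.toNat : Int) <<< 8) 0]
  | hi :: lo :: rest =>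
      PySem.Int.bor ((hi.toNat : Int) <<< 8) ((lo.toNat : Int)) :: asciiBody rest

set_option maxRecDepth 2048 in
theorem asciiGoA_eq (cs : List Char) (i : Nat) (acc : List Int) :
    asciiGoA cs i acc = acc ++ asciiBody (cs.drop i) := by
  rw [asciiGoA]
  split
  · rename_i h
    have hdrop : cs.drop i = cs[i] :: cs.drop (i + 1) := List.drop_eq_getElem_cons h
    by_cases h2 : i + 1 < cs.length
    · have hdrop2 : cs.drop (i + 1) = cs[i+1] :: cs.drop (i + 2) :=
        List.drop_eq_getElem_cons h2
      rw [asciiGoA_eq cs (i + 2), hdrop, hdrop2]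
      simp only [asciiBody]
      simp [h2]
    · have hnil : cs.drop (i + 1) = [] := by
        apply List.drop_eq_nil_of_le; omega
      have hnil2 : cs.drop (i + 2) = [] := by
        apply List.drop_eq_nil_of_le; omega
      rw [asciiGoA_eq cs (i + 2), hdrop, hnil, hnil2]
      simp only [asciiBody]
      simp [h2]
  · rename_i h
    have : cs.drop i = [] := by
      apply List.drop_eq_nil_of_le; omega
    simp [this, asciiBody]
termination_by cs.length - i

theorem asciiBody_eq_alt (cs : List Char) :
    asciiBody cs
      = (asciiPairsB (asciiPadB cs)).map
          (fun p => PySem.Int.bor ((p.1.toNat : Int) <<< 8) (p.2.toNat : Int)) := by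
  match cs with
  | [] => simp [asciiBody, asciiPadB, asciiPairsB]
  | [hi] =>
      simp [asciiBody, asciiPadB, asciiPairsB]

  | hi :: lo :: rest =>
      have hpad : asciiPadB (hi :: lo :: rest) = hi :: lo :: asciiPadB rest := by
        unfold asciiPadB
        have : (hi :: lo :: rest).length % 2 = rest.length % 2 := by
          simp [List.length_cons]; omega
        rw [this]
        split <;> simp
      rw [hpad]
      simp only [asciiBody, asciiPairsB, List.map_cons]
      rw [asciiBody_eq_alt rest]

-- ===== VERDICT (by name: the statement is the Claim_ definition above) =====
theorem ascii_string_to_blocks_spec : Claim_equal_ascii_string_to_blocks := by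
  intro s _
  unfold Spec_ascii_string_to_blocks ascii_string_to_blocks ascii_string_to_blocks_alt
  rw [asciiGoA_eq, List.drop_zero, List.nil_append, asciiBody_eq_alt]
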